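-- pv_equiv track=rewrite | github.com/SamwelZimmer/Kata | EnRouteSalute.py | solution
-- ===== SOURCE A (Python) =====
-- def solution(s):
--
--     # create variables to store the number of people moving right and number of salute interactions
--     right_movers, exchanges = 0, 0
--
--     # iterate through each item in list
--     for char in s:
--
--         # add to counter if moving right
--         if char == ">":
--             right_movers += 1
--
--         # if moving left but not at start of the input string increase exchange counters
--         if char == "<" and right_movers != 0:
--             exchanges += right_movers
--
--     # each exchange consists of two salutes
--     return exchanges * 2
-- ===== SOURCE B (Python) =====
-- def solution(s):
--     # brute force: for each '>' count every '<' that appears after it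
--     chars = list(s)
--     pairs = 0
--     while chars:
--         c = chars.pop(0)
--         if c == ">":
--             pairs += chars.count("<")  # left-movers after this right-mover
--     return pairs * 2
-- ===== Notes on version B (the rewrite author's own statement) =====
-- stated objective: alternative
-- what changed: Replaced A's single accumulating pass (a running counter of right-movers, added to the total at each left-mover) by an explicit brute-force pairwise count: pop each character and, for each right-mover, count the left-movers remaining after it.
import Mathlib
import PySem

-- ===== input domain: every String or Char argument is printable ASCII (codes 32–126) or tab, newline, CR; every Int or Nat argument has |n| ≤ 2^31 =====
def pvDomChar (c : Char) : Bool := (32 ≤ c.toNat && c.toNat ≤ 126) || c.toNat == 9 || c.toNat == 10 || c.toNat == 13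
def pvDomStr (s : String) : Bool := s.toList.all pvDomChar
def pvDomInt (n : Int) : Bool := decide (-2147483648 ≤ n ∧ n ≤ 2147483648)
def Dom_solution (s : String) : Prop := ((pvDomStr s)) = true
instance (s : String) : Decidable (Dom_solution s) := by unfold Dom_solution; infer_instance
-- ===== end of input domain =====

-- B replaces A's single accumulating pass by an explicit brute-force pairwise count ('alternative', not faster).

-- ===== PORT A =====
-- one pass: count right-movers seen so far, add that counter at each left-mover
def solution (s : String) : Int :=
  let st := s.toList.foldl (fun (st : Int × Int) c =>
    let r := if c == '>' then st.1 + 1 else st.1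
    let e := if c == '<' && decide (r ≠ 0) then st.2 + r else st.2
    (r, e)) (0, 0)
  st.2 * 2

-- ===== PORT B =====
-- brute force: pop the first char; if it is a right-mover, count every left-mover after it
def solLoopB : List Char → Int → Int
  | [], pairs => pairs
  | c :: rest, pairs =>
    solLoopB rest (if c == '>' then pairs + (rest.count '<' : Int) else pairs)

def solution_alt (s : String) : Int := solLoopB s.toList 0 * 2

-- ===== PRECONDITION & SPEC =====
def Spec_solution (s : String) (out : Int) : Prop := out = solution_alt s
instance (s : String) (out : Int) : Decidable (Spec_solution s out) := by unfold Spec_solution; infer_instance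

-- ===== CLAIM (what is proved, stated in full; the proofs are below) =====
def Claim_equal_solution : Prop := ∀ (s : String), Dom_solution s → Spec_solution s (solution s)

-- ===== LEMMAS AND PROOFS =====

-- B's loop with accumulator p equals p plus its value from 0
theorem solLoopB_acc (l : List Char) : ∀ (p : Int), solLoopB l p = p + solLoopB l 0 := by
  induction l with
  | nil => intro p; simp [solLoopB]
  | cons c rest ih =>
    intro p
    by_cases h : (c == '>') = true
    · simp only [solLoopB, h, if_true]
      rw [ih, ih ((0 : Int) + _)]
      ring
    · simp only [solLoopB, h, Bool.false_eq_true, if_false]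
      rw [ih]

-- invariant of A's loop: its final exchange count = e + r·(left-movers remaining) + B's pairwise count of the rest
theorem loopA_snd (l : List Char) : ∀ (r e : Int),
    (l.foldl (fun (st : Int × Int) c =>
      let r := if c == '>' then st.1 + 1 else st.1
      let e := if c == '<' && decide (r ≠ 0) then st.2 + r else st.2
      (r, e)) (r, e)).2 = e + r * (l.count '<' : Int) + solLoopB l 0 := by
  induction l with
  | nil => intro r e; simp [solLoopB]
  | cons c rest ih =>
    intro r e
    simp only [List.foldl_cons, List.count_cons, solLoopB]
    by_cases hgt : (c == '>') = true
    · have hne : (c == '<') = false := by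
        cases (beq_iff_eq.mp hgt); rfl
      simp only [hgt, hne, if_true, Bool.false_and, Bool.false_eq_true, if_false, ih,
        solLoopB_acc rest ((0 : Int) + _)]
      push_cast
      ring
    · by_cases hlt : (c == '<') = true
      · simp only [hgt, hlt, Bool.false_eq_true, if_false, if_true, Bool.true_and]
        by_cases hr : r = 0
        · subst hr
          simp only [ne_eq, not_true_eq_false, decide_false,
            Bool.false_eq_true, if_false, ih]
          push_cast
          ring
        · simp only [hr, ne_eq, not_false_eq_true, decide_true, if_true, ih]
          push_cast
          ring
      · simp only [hgt, hlt, Bool.false_eq_true, if_false, Bool.false_and, ih]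
        push_cast
        ring

-- ===== VERDICT (by name: the statement is the Claim_ definition above) =====
theorem solution_spec : Claim_equal_solution := by
  intro s _
  unfold Spec_solution solution solution_alt
  simp only []
  rw [loopA_snd]
  ring
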